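-- pv_equiv track=rewrite | github.com/amoweolubusayo/trainalyzeweb | app.py | categorise_email
-- ===== SOURCE A (Python) =====
-- def categorise_email(subject, body, sender):
--     """Categorise email type."""
--     text = (subject + ' ' + body).lower()
--
--     if any(kw in text for kw in ['delay repay', 'compensation claim', 'your claim', 'delay compensation']):
--         return 'delay_claim'
--     elif any(kw in text for kw in ['refund', 'money back', 'reimbursement', 'credited']):
--         return 'refund'
--     elif any(kw in text for kw in ['cancelled', 'cancellation', 'service disruption', 'not running']):
--         return 'cancellation'
--     elif any(kw in text for kw in ['delayed', 'delay', 'late', 'disruption']):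
--         return 'delay'
--     elif any(kw in text for kw in ['booking confirmation', 'e-ticket', 'your ticket', 'booking reference']):
--         return 'booking'
--     elif any(kw in text for kw in ['journey history', 'oyster statement', 'contactless statement']):
--         return 'statement'
--     elif any(kw in text for kw in ['receipt', 'payment', 'invoice']):
--         return 'receipt'
--     return 'other'
-- ===== SOURCE B (Python) =====
-- _KEYWORD_RANK = {
--     'delay repay': 0, 'compensation claim': 0, 'your claim': 0, 'delay compensation': 0,
--     'refund': 1, 'money back': 1, 'reimbursement': 1, 'credited': 1,
--     'cancelled': 2, 'cancellation': 2, 'service disruption': 2, 'not running': 2,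
--     'delayed': 3, 'delay': 3, 'late': 3, 'disruption': 3,
--     'booking confirmation': 4, 'e-ticket': 4, 'your ticket': 4, 'booking reference': 4,
--     'journey history': 5, 'oyster statement': 5, 'contactless statement': 5,
--     'receipt': 6, 'payment': 6, 'invoice': 6,
-- }
-- _LABELS = ['delay_claim', 'refund', 'cancellation', 'delay', 'booking',
--            'statement', 'receipt', 'other']
--
-- def categorise_email(subject, body, sender):
--     """Categorise email type: scan every keyword once and keep the minimal
--     (highest-priority) rank among those that occur; no early exit, selection
--     happens by minimisation rather than by an ordered chain of checks."""
--     text = (subject + ' ' + body).lower()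
--     best = 7  # rank of 'other'
--     for kw, rank in _KEYWORD_RANK.items():
--         if rank < best and kw in text:
--             best = rank
--     return _LABELS[best]
-- ===== Notes on version B (the rewrite author's own statement) =====
-- stated objective: alternative
-- what changed: Instead of A's ordered if/elif group checks with early return, B scans a flat keyword-to-rank map once, accumulates the minimal matching rank, and indexes a label table with it.
import Mathlib
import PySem

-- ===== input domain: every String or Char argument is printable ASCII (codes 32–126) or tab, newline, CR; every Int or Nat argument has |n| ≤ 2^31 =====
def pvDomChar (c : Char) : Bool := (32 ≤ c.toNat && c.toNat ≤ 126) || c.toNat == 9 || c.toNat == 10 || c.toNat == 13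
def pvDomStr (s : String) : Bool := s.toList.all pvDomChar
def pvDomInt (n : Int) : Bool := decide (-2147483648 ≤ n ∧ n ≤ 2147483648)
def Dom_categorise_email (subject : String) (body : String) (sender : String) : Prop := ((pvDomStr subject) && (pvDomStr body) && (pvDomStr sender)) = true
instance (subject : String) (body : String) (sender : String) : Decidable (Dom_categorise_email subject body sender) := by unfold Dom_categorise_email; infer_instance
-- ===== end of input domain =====

-- B replaces A's ordered if/elif chain by a single full pass over a flat keyword→rank map,
-- accumulating the minimal matching rank and indexing a label table; objective: alternative.

-- ===== PORT A =====
def categorise_email (subject : String) (body : String) (sender : String) : String :=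
  let text := PySem.Str.lower (subject ++ " " ++ body)
  if ["delay repay", "compensation claim", "your claim", "delay compensation"].any (fun kw => PySem.Str.isIn kw text) then "delay_claim"
  else if ["refund", "money back", "reimbursement", "credited"].any (fun kw => PySem.Str.isIn kw text) then "refund"
  else if ["cancelled", "cancellation", "service disruption", "not running"].any (fun kw => PySem.Str.isIn kw text) then "cancellation"
  else if ["delayed", "delay", "late", "disruption"].any (fun kw => PySem.Str.isIn kw text) then "delay"
  else if ["booking confirmation", "e-ticket", "your ticket", "booking reference"].any (fun kw => PySem.Str.isIn kw text) then "booking"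
  else if ["journey history", "oyster statement", "contactless statement"].any (fun kw => PySem.Str.isIn kw text) then "statement"
  else if ["receipt", "payment", "invoice"].any (fun kw => PySem.Str.isIn kw text) then "receipt"
  else "other"

-- ===== PORT B =====
-- Source B's _KEYWORD_RANK dict as an association list in insertion order
def pvKeywordRank : List (String × Nat) :=
  [("delay repay", 0), ("compensation claim", 0), ("your claim", 0), ("delay compensation", 0),
   ("refund", 1), ("money back", 1), ("reimbursement", 1), ("credited", 1),
   ("cancelled", 2), ("cancellation", 2), ("service disruption", 2), ("not running", 2),
   ("delayed", 3), ("delay", 3), ("late", 3), ("disruption", 3),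
   ("booking confirmation", 4), ("e-ticket", 4), ("your ticket", 4), ("booking reference", 4),
   ("journey history", 5), ("oyster statement", 5), ("contactless statement", 5),
   ("receipt", 6), ("payment", 6), ("invoice", 6)]

def pvLabels : List String :=
  ["delay_claim", "refund", "cancellation", "delay", "booking", "statement", "receipt", "other"]

def categorise_email_alt (subject : String) (body : String) (sender : String) : String :=
  let text := PySem.Str.lower (subject ++ " " ++ body)
  let best := pvKeywordRank.foldl
    (fun b p => if p.2 < b ∧ PySem.Str.isIn p.1 text then p.2 else b) 7
  pvLabels.getD best "other"

-- ===== PRECONDITION & SPEC =====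
def Spec_categorise_email (subject : String) (body : String) (sender : String) (out : String) : Prop := out = categorise_email_alt subject body sender
instance (subject : String) (body : String) (sender : String) (out : String) : Decidable (Spec_categorise_email subject body sender out) := by unfold Spec_categorise_email; infer_instance

-- ===== CLAIM =====
def Claim_equal_categorise_email : Prop := ∀ (subject : String) (body : String) (sender : String), Dom_categorise_email subject body sender → Spec_categorise_email subject body sender (categorise_email subject body sender)

-- ===== LEMMAS AND PROOFS =====

-- folding B's min-rank step over a same-rank segment of the keyword table
theorem pv_seg (text : String) (r : Nat) (kws : List String) (b : Nat) :
    (kws.map (fun k => (k, r))).foldl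
      (fun b p => if p.2 < b ∧ PySem.Str.isIn p.1 text then p.2 else b) b
    = if r < b ∧ kws.any (fun kw => PySem.Str.isIn kw text) then r else b := by
  induction kws generalizing b with
  | nil => simp
  | cons k ks ih =>
    simp only [List.map_cons, List.foldl_cons, List.any_cons, Bool.or_eq_true]
    cases hk : PySem.Str.isIn k text with
    | true =>
      by_cases hr : r < b
      · rw [if_pos ⟨hr, rfl⟩, ih]
        rw [if_neg (fun h => lt_irrefl r h.1), if_pos ⟨hr, Or.inl rfl⟩]
      · rw [if_neg (fun h => hr h.1), ih, if_neg (fun h => hr h.1), if_neg (fun h => hr h.1)]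
    | false =>
      rw [if_neg (fun h => Bool.false_ne_true h.2), ih]
      by_cases hr : r < b
      · by_cases ha : ks.any (fun kw => PySem.Str.isIn kw text) = true
        · rw [if_pos ⟨hr, ha⟩, if_pos ⟨hr, Or.inr ha⟩]
        · rw [if_neg (fun h => ha h.2), if_neg (fun h => h.2.elim (fun c => Bool.false_ne_true c) ha)]
      · rw [if_neg (fun h => hr h.1), if_neg (fun h => hr h.1)]

theorem pv_split : pvKeywordRank =
    (["delay repay", "compensation claim", "your claim", "delay compensation"].map (fun k => (k, (0:Nat))))
    ++ (["refund", "money back", "reimbursement", "credited"].map (fun k => (k, (1:Nat))))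
    ++ (["cancelled", "cancellation", "service disruption", "not running"].map (fun k => (k, (2:Nat))))
    ++ (["delayed", "delay", "late", "disruption"].map (fun k => (k, (3:Nat))))
    ++ (["booking confirmation", "e-ticket", "your ticket", "booking reference"].map (fun k => (k, (4:Nat))))
    ++ (["journey history", "oyster statement", "contactless statement"].map (fun k => (k, (5:Nat))))
    ++ (["receipt", "payment", "invoice"].map (fun k => (k, (6:Nat)))) := by
  rfl

-- ===== VERDICT =====
theorem categorise_email_spec : Claim_equal_categorise_email := by
  intro subject body sender _
  unfold Spec_categorise_email categorise_email categorise_email_alt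
  rw [pv_split]
  simp only [List.foldl_append, pv_seg]
  generalize (["delay repay", "compensation claim", "your claim", "delay compensation"].any (fun kw => PySem.Str.isIn kw (PySem.Str.lower (subject ++ " " ++ body)))) = a0
  generalize (["refund", "money back", "reimbursement", "credited"].any (fun kw => PySem.Str.isIn kw (PySem.Str.lower (subject ++ " " ++ body)))) = a1
  generalize (["cancelled", "cancellation", "service disruption", "not running"].any (fun kw => PySem.Str.isIn kw (PySem.Str.lower (subject ++ " " ++ body)))) = a2
  generalize (["delayed", "delay", "late", "disruption"].any (fun kw => PySem.Str.isIn kw (PySem.Str.lower (subject ++ " " ++ body)))) = a3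
  generalize (["booking confirmation", "e-ticket", "your ticket", "booking reference"].any (fun kw => PySem.Str.isIn kw (PySem.Str.lower (subject ++ " " ++ body)))) = a4
  generalize (["journey history", "oyster statement", "contactless statement"].any (fun kw => PySem.Str.isIn kw (PySem.Str.lower (subject ++ " " ++ body)))) = a5
  generalize (["receipt", "payment", "invoice"].any (fun kw => PySem.Str.isIn kw (PySem.Str.lower (subject ++ " " ++ body)))) = a6
  revert a0 a1 a2 a3 a4 a5 a6
  decide
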